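-- pv_equiv track=rewrite | github.com/pypi-data/pypi-mirror-380 | packages/extrator-xml-fiscal/extrator_xml_fiscal-1.0.0.tar.gz/extrator_xml_fiscal-1.0.0/extrator_xml_fiscal/extrator_nfe.py | _extrair_icms
-- ===== SOURCE A (Python) =====
-- from typing import Dict, Any, List, Optional
--
-- def _extrair_icms(dados_icms: Dict[str, Any]) -> Dict[str, Any]:
--     """Extrai dados do ICMS."""
--     # Encontra o tipo de ICMS
--     icms_tipo = {}
--     chave_icms = None
--
--     for chave, valor in dados_icms.items():
--         if chave.startswith('ICMS'):
--             icms_tipo = valor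
--             chave_icms = chave
--             break
--
--     icms_base = {
--         'modalidade': chave_icms,
--         'origem': icms_tipo.get('orig'),
--         'cst': icms_tipo.get('CST'),
--         'csosn': icms_tipo.get('CSOSN')  # Para Simples Nacional
--     }
--
--     # Campos específicos por modalidade
--     # Base de cálculo e valor ICMS próprio
--     if 'vBC' in icms_tipo:
--         icms_base['valor_bc'] = icms_tipo.get('vBC')
--     if 'pICMS' in icms_tipo:
--         icms_base['aliquota'] = icms_tipo.get('pICMS')
--     if 'vICMS' in icms_tipo:
--         icms_base['valor_icms'] = icms_tipo.get('vICMS')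
--     if 'pRedBC' in icms_tipo:
--         icms_base['percentual_reducao_bc'] = icms_tipo.get('pRedBC')
--
--     # ICMS ST
--     if 'vBCST' in icms_tipo:
--         icms_base['valor_bc_st'] = icms_tipo.get('vBCST')
--     if 'pICMSST' in icms_tipo:
--         icms_base['aliquota_st'] = icms_tipo.get('pICMSST')
--     if 'vICMSST' in icms_tipo:
--         icms_base['valor_icms_st'] = icms_tipo.get('vICMSST')
--     if 'pMVAST' in icms_tipo:
--         icms_base['margem_valor_agregado_st'] = icms_tipo.get('pMVAST')
--     if 'pRedBCST' in icms_tipo: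
--         icms_base['percentual_reducao_bc_st'] = icms_tipo.get('pRedBCST')
--
--     # FCP (Fundo de Combate à Pobreza)
--     if 'vBCFCP' in icms_tipo:
--         icms_base['valor_bc_fcp'] = icms_tipo.get('vBCFCP')
--     if 'pFCP' in icms_tipo:
--         icms_base['percentual_fcp'] = icms_tipo.get('pFCP')
--     if 'vFCP' in icms_tipo:
--         icms_base['valor_fcp'] = icms_tipo.get('vFCP')
--
--     # FCP ST
--     if 'vBCFCPST' in icms_tipo:
--         icms_base['valor_bc_fcp_st'] = icms_tipo.get('vBCFCPST')
--     if 'pFCPST' in icms_tipo: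
--         icms_base['percentual_fcp_st'] = icms_tipo.get('pFCPST')
--     if 'vFCPST' in icms_tipo:
--         icms_base['valor_fcp_st'] = icms_tipo.get('vFCPST')
--
--     # ICMS Monofásico (campos específicos)
--     if 'qBCMono' in icms_tipo:
--         icms_base['quantidade_bc_mono'] = icms_tipo.get('qBCMono')
--     if 'adRemICMS' in icms_tipo:
--         icms_base['aliquota_ad_rem'] = icms_tipo.get('adRemICMS')
--     if 'vICMSMono' in icms_tipo:
--         icms_base['valor_icms_mono'] = icms_tipo.get('vICMSMono')
--
--     # Desoneração
--     if 'vICMSDeson' in icms_tipo: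
--         icms_base['valor_icms_desoneracao'] = icms_tipo.get('vICMSDeson')
--     if 'motDesICMS' in icms_tipo:
--         icms_base['motivo_desoneracao'] = icms_tipo.get('motDesICMS')
--     if 'indDeduzDeson' in icms_tipo:
--         icms_base['indicador_deduz_desoneracao'] = icms_tipo.get('indDeduzDeson')
--
--     # Simples Nacional - crédito
--     if 'pCredSN' in icms_tipo:
--         icms_base['percentual_credito_sn'] = icms_tipo.get('pCredSN')
--     if 'vCredICMSSN' in icms_tipo:
--         icms_base['valor_credito_icms_sn'] = icms_tipo.get('vCredICMSSN')
--
--     # ST Retido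
--     if 'vBCSTRet' in icms_tipo:
--         icms_base['valor_bc_st_retido'] = icms_tipo.get('vBCSTRet')
--     if 'vICMSSTRet' in icms_tipo:
--         icms_base['valor_icms_st_retido'] = icms_tipo.get('vICMSSTRet')
--
--     return icms_base
-- ===== SOURCE B (Python) =====
-- _SOURCES = [
--     'vBC', 'pICMS', 'vICMS', 'pRedBC',
--     'vBCST', 'pICMSST', 'vICMSST', 'pMVAST', 'pRedBCST',
--     'vBCFCP', 'pFCP', 'vFCP',
--     'vBCFCPST', 'pFCPST', 'vFCPST',
--     'qBCMono', 'adRemICMS', 'vICMSMono',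
--     'vICMSDeson', 'motDesICMS', 'indDeduzDeson',
--     'pCredSN', 'vCredICMSSN',
--     'vBCSTRet', 'vICMSSTRet',
-- ]
-- _TARGETS = [
--     'valor_bc', 'aliquota', 'valor_icms', 'percentual_reducao_bc',
--     'valor_bc_st', 'aliquota_st', 'valor_icms_st', 'margem_valor_agregado_st',
--     'percentual_reducao_bc_st',
--     'valor_bc_fcp', 'percentual_fcp', 'valor_fcp',
--     'valor_bc_fcp_st', 'percentual_fcp_st', 'valor_fcp_st',
--     'quantidade_bc_mono', 'aliquota_ad_rem', 'valor_icms_mono',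
--     'valor_icms_desoneracao', 'motivo_desoneracao', 'indicador_deduz_desoneracao',
--     'percentual_credito_sn', 'valor_credito_icms_sn',
--     'valor_bc_st_retido', 'valor_icms_st_retido',
-- ]
-- _INDEX = {s: i for i, s in enumerate(_SOURCES)}
--
--
-- def _extrair_icms(dados_icms):
--     """Extrai dados do ICMS (inverted index over the data, one pass + sort)."""
--     chave_icms, icms_tipo = None, {}
--     for chave, valor in dados_icms.items():
--         if chave.startswith('ICMS'):
--             chave_icms, icms_tipo = chave, valor
--             break
--     # one pass over the ICMS group itself, classifying each key via the
--     # inverted index; found maps table position -> value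
--     found = {}
--     for campo, valor in icms_tipo.items():
--         i = _INDEX.get(campo)
--         if i is not None:
--             found[i] = valor
--     pares = [('modalidade', chave_icms),
--              ('origem', icms_tipo.get('orig')),
--              ('cst', icms_tipo.get('CST')),
--              ('csosn', icms_tipo.get('CSOSN'))]
--     pares.extend((_TARGETS[i], found[i]) for i in sorted(found))
--     return dict(pares)
-- ===== Notes on version B (the rewrite author's own statement) =====
-- stated objective: alternative
-- what changed: A's straight-line chain of 25 'if key in icms_tipo' copies is replaced by the inverse traversal: one pass over the ICMS group itself classifying each of its keys through a precomputed inverted index (source key -> table position), then a sort of the hit positions to emit the fields in canonical order; the break-loop becomes a find expression and the result dict is built once from a pair list.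
import Mathlib
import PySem

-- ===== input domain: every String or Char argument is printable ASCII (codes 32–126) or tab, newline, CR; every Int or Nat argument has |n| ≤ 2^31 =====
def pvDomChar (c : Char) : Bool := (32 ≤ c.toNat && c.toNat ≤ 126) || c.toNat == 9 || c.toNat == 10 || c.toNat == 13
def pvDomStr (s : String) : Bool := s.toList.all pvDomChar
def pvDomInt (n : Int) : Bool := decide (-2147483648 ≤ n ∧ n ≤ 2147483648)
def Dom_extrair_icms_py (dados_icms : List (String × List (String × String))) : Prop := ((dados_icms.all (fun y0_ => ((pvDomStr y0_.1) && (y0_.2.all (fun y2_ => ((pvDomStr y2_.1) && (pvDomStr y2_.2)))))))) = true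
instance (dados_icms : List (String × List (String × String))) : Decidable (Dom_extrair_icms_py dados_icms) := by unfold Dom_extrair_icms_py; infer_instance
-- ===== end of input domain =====

-- B replaces A's straight-line 25-branch if-chain by one inverted-index pass over the ICMS group
-- itself followed by a sort of the hit positions; objective: alternative decomposition, same cost.

-- ===== PORT A =====
-- A's `for chave, valor in dados_icms.items(): if chave.startswith('ICMS'): … break`
def pvFindIcmsA : List (String × List (String × String)) → Option String × List (String × String)
  | [] => (none, [])
  | (chave, valor) :: rest =>
      if PySem.Str.startswith chave "ICMS" then (some chave, valor) else pvFindIcmsA rest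

def extrair_icms_py (dados_icms : List (String × List (String × String))) : List (String × Option String) :=
  let fr := pvFindIcmsA dados_icms
  let chave_icms := fr.1
  let icms_tipo : PySem.Dict String String := PySem.Dict.mk fr.2
  let icms_base : PySem.Dict String (Option String) := PySem.Dict.mk
    [("modalidade", chave_icms), ("origem", icms_tipo.get? "orig"),
     ("cst", icms_tipo.get? "CST"), ("csosn", icms_tipo.get? "CSOSN")]
  let icms_base := if icms_tipo.contains "vBC" then icms_base.insert "valor_bc" (icms_tipo.get? "vBC") else icms_base
  let icms_base := if icms_tipo.contains "pICMS" then icms_base.insert "aliquota" (icms_tipo.get? "pICMS") else icms_base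
  let icms_base := if icms_tipo.contains "vICMS" then icms_base.insert "valor_icms" (icms_tipo.get? "vICMS") else icms_base
  let icms_base := if icms_tipo.contains "pRedBC" then icms_base.insert "percentual_reducao_bc" (icms_tipo.get? "pRedBC") else icms_base
  let icms_base := if icms_tipo.contains "vBCST" then icms_base.insert "valor_bc_st" (icms_tipo.get? "vBCST") else icms_base
  let icms_base := if icms_tipo.contains "pICMSST" then icms_base.insert "aliquota_st" (icms_tipo.get? "pICMSST") else icms_base
  let icms_base := if icms_tipo.contains "vICMSST" then icms_base.insert "valor_icms_st" (icms_tipo.get? "vICMSST") else icms_base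
  let icms_base := if icms_tipo.contains "pMVAST" then icms_base.insert "margem_valor_agregado_st" (icms_tipo.get? "pMVAST") else icms_base
  let icms_base := if icms_tipo.contains "pRedBCST" then icms_base.insert "percentual_reducao_bc_st" (icms_tipo.get? "pRedBCST") else icms_base
  let icms_base := if icms_tipo.contains "vBCFCP" then icms_base.insert "valor_bc_fcp" (icms_tipo.get? "vBCFCP") else icms_base
  let icms_base := if icms_tipo.contains "pFCP" then icms_base.insert "percentual_fcp" (icms_tipo.get? "pFCP") else icms_base
  let icms_base := if icms_tipo.contains "vFCP" then icms_base.insert "valor_fcp" (icms_tipo.get? "vFCP") else icms_base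
  let icms_base := if icms_tipo.contains "vBCFCPST" then icms_base.insert "valor_bc_fcp_st" (icms_tipo.get? "vBCFCPST") else icms_base
  let icms_base := if icms_tipo.contains "pFCPST" then icms_base.insert "percentual_fcp_st" (icms_tipo.get? "pFCPST") else icms_base
  let icms_base := if icms_tipo.contains "vFCPST" then icms_base.insert "valor_fcp_st" (icms_tipo.get? "vFCPST") else icms_base
  let icms_base := if icms_tipo.contains "qBCMono" then icms_base.insert "quantidade_bc_mono" (icms_tipo.get? "qBCMono") else icms_base
  let icms_base := if icms_tipo.contains "adRemICMS" then icms_base.insert "aliquota_ad_rem" (icms_tipo.get? "adRemICMS") else icms_base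
  let icms_base := if icms_tipo.contains "vICMSMono" then icms_base.insert "valor_icms_mono" (icms_tipo.get? "vICMSMono") else icms_base
  let icms_base := if icms_tipo.contains "vICMSDeson" then icms_base.insert "valor_icms_desoneracao" (icms_tipo.get? "vICMSDeson") else icms_base
  let icms_base := if icms_tipo.contains "motDesICMS" then icms_base.insert "motivo_desoneracao" (icms_tipo.get? "motDesICMS") else icms_base
  let icms_base := if icms_tipo.contains "indDeduzDeson" then icms_base.insert "indicador_deduz_desoneracao" (icms_tipo.get? "indDeduzDeson") else icms_base
  let icms_base := if icms_tipo.contains "pCredSN" then icms_base.insert "percentual_credito_sn" (icms_tipo.get? "pCredSN") else icms_base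
  let icms_base := if icms_tipo.contains "vCredICMSSN" then icms_base.insert "valor_credito_icms_sn" (icms_tipo.get? "vCredICMSSN") else icms_base
  let icms_base := if icms_tipo.contains "vBCSTRet" then icms_base.insert "valor_bc_st_retido" (icms_tipo.get? "vBCSTRet") else icms_base
  let icms_base := if icms_tipo.contains "vICMSSTRet" then icms_base.insert "valor_icms_st_retido" (icms_tipo.get? "vICMSSTRet") else icms_base
  icms_base.items

-- ===== PORT B =====
def pvSources : List String :=
  ["vBC", "pICMS", "vICMS", "pRedBC",
   "vBCST", "pICMSST", "vICMSST", "pMVAST", "pRedBCST",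
   "vBCFCP", "pFCP", "vFCP",
   "vBCFCPST", "pFCPST", "vFCPST",
   "qBCMono", "adRemICMS", "vICMSMono",
   "vICMSDeson", "motDesICMS", "indDeduzDeson",
   "pCredSN", "vCredICMSSN",
   "vBCSTRet", "vICMSSTRet"]

def pvTargets : List String :=
  ["valor_bc", "aliquota", "valor_icms", "percentual_reducao_bc",
   "valor_bc_st", "aliquota_st", "valor_icms_st", "margem_valor_agregado_st",
   "percentual_reducao_bc_st",
   "valor_bc_fcp", "percentual_fcp", "valor_fcp",
   "valor_bc_fcp_st", "percentual_fcp_st", "valor_fcp_st",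
   "quantidade_bc_mono", "aliquota_ad_rem", "valor_icms_mono",
   "valor_icms_desoneracao", "motivo_desoneracao", "indicador_deduz_desoneracao",
   "percentual_credito_sn", "valor_credito_icms_sn",
   "valor_bc_st_retido", "valor_icms_st_retido"]

-- _INDEX = {s: i for i, s in enumerate(_SOURCES)}
def pvIndex : PySem.Dict String Nat := PySem.Dict.ofList pvSources.zipIdx

def extrair_icms_py_alt (dados_icms : List (String × List (String × String))) : List (String × Option String) :=
  -- the break-loop, written as a find over the items
  let fr : Option String × List (String × String) :=
    match dados_icms.find? (fun p => PySem.Str.startswith p.1 "ICMS") with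
    | some (k, v) => (some k, v)
    | none => (none, [])
  let icms_tipo : PySem.Dict String String := PySem.Dict.mk fr.2
  -- one pass over icms_tipo, classifying each key via the inverted index
  let found : PySem.Dict Nat String :=
    icms_tipo.items.foldl (fun f p =>
      match pvIndex.get? p.1 with
      | some i => f.insert i p.2
      | none => f) PySem.Dict.empty
  let pares : List (String × Option String) :=
    [("modalidade", fr.1), ("origem", icms_tipo.get? "orig"),
     ("cst", icms_tipo.get? "CST"), ("csosn", icms_tipo.get? "CSOSN")]
    ++ (PySem.List.sorted found.keys (fun i => i)).map
        (fun i => (pvTargets.getD i "", some (found.getD i "")))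
  (PySem.Dict.ofList pares).items

-- ===== PRECONDITION & SPEC =====
-- Pre_ requires pairwise-distinct keys in the outer association list and in each inner one:
-- these lists encode Python dicts (which cannot carry duplicate keys), so no input that reaches
-- the Python function is excluded.
def Pre_extrair_icms_py (dados_icms : List (String × List (String × String))) : Prop :=
  (dados_icms.map Prod.fst).Nodup ∧ ∀ p ∈ dados_icms, (p.2.map Prod.fst).Nodup
instance (dados_icms : List (String × List (String × String))) : Decidable (Pre_extrair_icms_py dados_icms) := by unfold Pre_extrair_icms_py; infer_instance

def pvWitness_extrair_icms_py : (List (String × List (String × String))) :=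
  [("ICMS00", [("orig", "0"), ("CST", "00"), ("vBC", "100.00"), ("pICMS", "18.00")])]

def Spec_extrair_icms_py (dados_icms : List (String × List (String × String))) (out : List (String × Option String)) : Prop := out = extrair_icms_py_alt dados_icms
instance (dados_icms : List (String × List (String × String))) (out : List (String × Option String)) : Decidable (Spec_extrair_icms_py dados_icms out) := by unfold Spec_extrair_icms_py; infer_instance

-- ===== CLAIM (what is proved, stated in full; the proofs are below) =====
def Claim_equal_extrair_icms_py : Prop := ∀ (dados_icms : List (String × List (String × String))), Dom_extrair_icms_py dados_icms → Pre_extrair_icms_py dados_icms → Spec_extrair_icms_py dados_icms (extrair_icms_py dados_icms)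

-- ===== LEMMAS AND PROOFS =====

-- A's break-loop computes the same pair as B's find?-based expression.
theorem pvFindIcmsA_eq_find? (l : List (String × List (String × String))) :
    pvFindIcmsA l =
      (match l.find? (fun p => PySem.Str.startswith p.1 "ICMS") with
       | some (k, v) => (some k, v)
       | none => (none, [])) := by
  induction l with
  | nil => rfl
  | cons hd tl ih =>
      obtain ⟨k, v⟩ := hd
      simp only [pvFindIcmsA, List.find?_cons]
      cases h : PySem.Str.startswith k "ICMS" <;> simp_all

-- the (source, target) table and the step of A's if-chain
def pvTable : List (String × String) := pvSources.zip pvTargets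

def pvStepA (d : PySem.Dict String String) (b : PySem.Dict String (Option String))
    (p : String × String) : PySem.Dict String (Option String) :=
  if d.contains p.1 then b.insert p.2 (d.get? p.1) else b

-- A's if-chain over fresh distinct target keys appends the filtered table.
theorem pvFoldA (d : PySem.Dict String String) (table : List (String × String))
    (acc : PySem.Dict String (Option String))
    (hfresh : ∀ p ∈ table, acc.contains p.2 = false)
    (hnd : (table.map Prod.snd).Nodup) :
    (table.foldl (pvStepA d) acc).items =
      acc.items ++ (table.filter (fun p => d.contains p.1)).map (fun p => (p.2, d.get? p.1)) := by
  induction table generalizing acc with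
  | nil => simp
  | cons hd tl ih =>
      obtain ⟨s, t⟩ := hd
      simp only [List.map_cons, List.nodup_cons] at hnd
      have hft : acc.contains t = false := hfresh (s, t) (List.mem_cons_self)
      by_cases hc : d.contains s = true
      · have hstep : pvStepA d acc (s, t) = acc.insert t (d.get? s) := by
          simp [pvStepA, hc]
        have hfresh' : ∀ p ∈ tl, (acc.insert t (d.get? s)).contains p.2 = false := by
          intro p hp
          rw [PySem.Dict.contains_insert]
          have hne : p.2 ≠ t := by
            intro h; exact hnd.1 (h ▸ List.mem_map_of_mem hp)
          simp [hne, hfresh p (List.mem_cons_of_mem _ hp)]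
        rw [List.foldl_cons, hstep, ih _ hfresh' hnd.2,
            PySem.Dict.items_insert_of_not_contains _ _ hft]
        simp [hc]
      · have hstep : pvStepA d acc (s, t) = acc := by
          simp [pvStepA, hc]
        rw [List.foldl_cons, hstep, ih _ (fun p hp => hfresh p (List.mem_cons_of_mem _ hp)) hnd.2]
        simp [hc]

-- A's whole body is the base dict followed by that fold (the chain is the fold, unrolled).
theorem pvA_eq_fold (dados : List (String × List (String × String))) :
    extrair_icms_py dados =
      (pvTable.foldl (pvStepA (PySem.Dict.mk (pvFindIcmsA dados).2))
        (PySem.Dict.mk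
          [("modalidade", (pvFindIcmsA dados).1),
           ("origem", (PySem.Dict.mk (pvFindIcmsA dados).2).get? "orig"),
           ("cst", (PySem.Dict.mk (pvFindIcmsA dados).2).get? "CST"),
           ("csosn", (PySem.Dict.mk (pvFindIcmsA dados).2).get? "CSOSN")])).items := by
  rfl

-- B's one-pass-with-skip fold is the plain insert fold over the classified pairs.
def pvPairs (l : List (String × String)) : List (Nat × String) :=
  l.filterMap (fun p => (pvIndex.get? p.1).map (fun i => (i, p.2)))

theorem pvFoldB (l : List (String × String)) (f0 : PySem.Dict Nat String) :
    l.foldl (fun f p =>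
        match pvIndex.get? p.1 with
        | some i => f.insert i p.2
        | none => f) f0 =
      (pvPairs l).foldl (fun f q => f.insert q.1 q.2) f0 := by
  induction l generalizing f0 with
  | nil => rfl
  | cons hd tl ih =>
      obtain ⟨k, v⟩ := hd
      simp only [pvPairs, List.filterMap_cons]
      cases h : pvIndex.get? k <;> simp [List.foldl_cons, h, ih, pvPairs]

-- facts about the literal inverted index
theorem pvIndex_get?_sources (i : Nat) (hi : i < 25) :
    pvIndex.get? (pvSources.getD i "") = some i := by
  interval_cases i <;> decide

theorem pvIndex_get?_inv (k : String) (i : Nat) (h : pvIndex.get? k = some i) :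
    i < 25 ∧ pvSources.getD i "" = k := by
  have hnd : pvIndex.keys.Nodup := by decide
  have hmem : (k, i) ∈ pvIndex.items :=
    ((PySem.Dict.get?_eq_some_iff_mem_items pvIndex k i hnd).mp h)
  have hall : ∀ q ∈ pvIndex.items, q.2 < 25 ∧ pvSources.getD q.2 "" = q.1 := by decide
  exact hall (k, i) hmem

-- the group A's break-loop selects has distinct keys whenever every inner list does
theorem pvFind_nodup (l : List (String × List (String × String)))
    (h : ∀ p ∈ l, (p.2.map Prod.fst).Nodup) :
    ((pvFindIcmsA l).2.map Prod.fst).Nodup := by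
  induction l with
  | nil => simp [pvFindIcmsA]
  | cons hd tl ih =>
      obtain ⟨k, v⟩ := hd
      rw [pvFindIcmsA]
      split_ifs with hs
      · exact h (k, v) List.mem_cons_self
      · exact ih (fun p hp => h p (List.mem_cons_of_mem _ hp))

-- ===== VERDICT helpers: the main per-dict lemma =====
theorem pvMain (c : Option String) (l : List (String × String))
    (hnd : (l.map Prod.fst).Nodup) :
    ((pvTable.foldl (pvStepA (PySem.Dict.mk l))
        (PySem.Dict.mk
          [("modalidade", c),
           ("origem", (PySem.Dict.mk l).get? "orig"),
           ("cst", (PySem.Dict.mk l).get? "CST"),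
           ("csosn", (PySem.Dict.mk l).get? "CSOSN")])).items)
    =
    (PySem.Dict.ofList
      ([("modalidade", c),
        ("origem", (PySem.Dict.mk l).get? "orig"),
        ("cst", (PySem.Dict.mk l).get? "CST"),
        ("csosn", (PySem.Dict.mk l).get? "CSOSN")]
       ++ (PySem.List.sorted
            (l.foldl (fun f p =>
              match pvIndex.get? p.1 with
              | some i => f.insert i p.2
              | none => f) PySem.Dict.empty).keys (fun i => i)).map
          (fun i => (pvTargets.getD i "",
            some ((l.foldl (fun f p =>
              match pvIndex.get? p.1 with
              | some i => f.insert i p.2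
              | none => f) PySem.Dict.empty).getD i "")))) ).items := by
  set d : PySem.Dict String String := PySem.Dict.mk l with hdd
  set F : PySem.Dict Nat String :=
    l.foldl (fun f p =>
      match pvIndex.get? p.1 with
      | some i => f.insert i p.2
      | none => f) PySem.Dict.empty with hF
  have hditems : d.items = l := rfl
  have hdkeys : d.keys = l.map Prod.fst := rfl
  have hdknd : d.keys.Nodup := hnd
  -- B's fold, characterised
  have hKI : (pvPairs l).map Prod.fst = (l.map Prod.fst).filterMap (fun k => pvIndex.get? k) := by
    simp only [pvPairs, List.map_filterMap, List.filterMap_map]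
    congr 1
    funext p
    cases h : pvIndex.get? p.1 <;> simp [h]
  have hKInd : ((pvPairs l).map Prod.fst).Nodup := by
    rw [hKI]
    refine List.Nodup.filterMap (fun a a' b hb hb' => ?_) hnd
    obtain ⟨_, ha⟩ := pvIndex_get?_inv a b hb
    obtain ⟨_, ha'⟩ := pvIndex_get?_inv a' b hb'
    rw [← ha, ← ha']
  have hitems : F.items = pvPairs l := by
    rw [hF, pvFoldB]
    simpa using PySem.Dict.items_foldl_insert_fresh (pvPairs l) Prod.fst Prod.snd
      PySem.Dict.empty (fun a _ => PySem.Dict.contains_empty _) hKInd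
  have hkeys : F.keys = (pvPairs l).map Prod.fst := by
    simp only [PySem.Dict.keys, hitems]
  have hknd : F.keys.Nodup := by rw [hkeys]; exact hKInd
  -- the ascending list of hit positions
  set asc : List Nat := (List.range 25).filter (fun i => d.contains (pvSources.getD i "")) with hasc
  have hascnd : asc.Nodup := List.nodup_range.filter _
  have hasclt : asc.Pairwise (· < ·) := List.pairwise_lt_range.filter _
  have hascmem : ∀ i, i ∈ asc ↔ i < 25 ∧ d.contains (pvSources.getD i "") = true := by
    intro i; simp [hasc, List.mem_filter, List.mem_range]
  have hmem : ∀ i, i ∈ F.keys ↔ i ∈ asc := by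
    intro i
    rw [hkeys, hKI, List.mem_filterMap, hascmem]
    constructor
    · rintro ⟨k, hk, hg⟩
      obtain ⟨hi, hs⟩ := pvIndex_get?_inv k i hg
      refine ⟨hi, ?_⟩
      rw [PySem.Dict.contains_iff_mem_keys, hdkeys, hs]
      exact hk
    · rintro ⟨hi, hc⟩
      refine ⟨pvSources.getD i "", ?_, pvIndex_get?_sources i hi⟩
      rw [PySem.Dict.contains_iff_mem_keys, hdkeys] at hc
      exact hc
  have hsorted : PySem.List.sorted F.keys (fun i => i) = asc := by
    refine PySem.List.sorted_eq_of_perm_of_pairwise_lt _ _ _ ?_ hasclt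
    refine List.perm_of_nodup_nodup_toFinset_eq hascnd hknd ?_
    ext i
    simp [List.mem_toFinset, hmem i]
  -- values carried by the hit positions
  have hval : ∀ i ∈ asc,
      (pvTargets.getD i "", some (F.getD i "")) = (pvTargets.getD i "", d.get? (pvSources.getD i "")) := by
    intro i hi
    obtain ⟨hi25, hc⟩ := (hascmem i).mp hi
    rw [PySem.Dict.contains_iff_mem_keys, hdkeys] at hc
    obtain ⟨⟨k, v⟩, hpl, hk⟩ := List.mem_map.mp hc
    have hgd : d.get? (pvSources.getD i "") = some v := by
      refine PySem.Dict.get?_of_mem_items d ?_ hdknd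
      rw [hditems, ← hk]; exact hpl
    have hpp : (i, v) ∈ pvPairs l := by
      rw [pvPairs, List.mem_filterMap]
      refine ⟨(k, v), hpl, ?_⟩
      have hk' : k = pvSources.getD i "" := hk
      rw [hk', pvIndex_get?_sources i hi25]
      rfl
    have hFv : F.getD i "" = v := by
      refine PySem.Dict.getD_of_mem_items F ?_ hknd ""
      rw [hitems]; exact hpp
    rw [hFv, hgd]
  -- A's side: unroll the fold over the table
  have hfresh : ∀ p ∈ pvTable,
      (PySem.Dict.mk
        [("modalidade", c), ("origem", d.get? "orig"),
         ("cst", d.get? "CST"), ("csosn", d.get? "CSOSN")]).contains p.2 = false := by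
    intro p hp
    fin_cases hp <;> simp [PySem.Dict.contains_mk]
  have htnd : (pvTable.map Prod.snd).Nodup := by decide
  rw [pvFoldA d pvTable _ hfresh htnd]
  -- B's side: the assembled pair list has fresh distinct keys, so ofList keeps it
  rw [hsorted]
  have hmapval :
      asc.map (fun i => (pvTargets.getD i "", some (F.getD i ""))) =
      asc.map (fun i => (pvTargets.getD i "", d.get? (pvSources.getD i ""))) :=
    List.map_congr_left hval
  rw [hmapval]
  have hparnd :
      (([("modalidade", c), ("origem", d.get? "orig"),
         ("cst", d.get? "CST"), ("csosn", d.get? "CSOSN")]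
        ++ asc.map (fun i => (pvTargets.getD i "", d.get? (pvSources.getD i "")))).map Prod.fst).Nodup := by
    rw [List.map_append]
    refine List.Nodup.append ?_ ?_ ?_
    · exact (by decide : (["modalidade", "origem", "cst", "csosn"] : List String).Nodup)
    · rw [List.map_map]
      refine List.Nodup.map_on ?_ hascnd
      intro x hx y hy hxy
      have hx25 := ((hascmem x).mp hx).1
      have hy25 := ((hascmem y).mp hy).1
      have hinj : ∀ i < 25, ∀ j < 25, pvTargets.getD i "" = pvTargets.getD j "" → i = j := by decide
      exact hinj x hx25 y hy25 hxy
    · intro a ha hb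
      rw [List.map_map, List.mem_map] at hb
      obtain ⟨i, hi, hti⟩ := hb
      have hi25 := ((hascmem i).mp hi).1
      have hnb : ∀ i < 25, pvTargets.getD i "" ∉ (["modalidade", "origem", "cst", "csosn"] : List String) := by decide
      have hti' : pvTargets.getD i "" = a := hti
      have ha' : a ∈ (["modalidade", "origem", "cst", "csosn"] : List String) := ha
      exact hnb i hi25 (hti' ▸ ha')
  have hofl :
      (PySem.Dict.ofList
        ([("modalidade", c), ("origem", d.get? "orig"),
          ("cst", d.get? "CST"), ("csosn", d.get? "CSOSN")]
         ++ asc.map (fun i => (pvTargets.getD i "", d.get? (pvSources.getD i ""))))).items =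
      [("modalidade", c), ("origem", d.get? "orig"),
       ("cst", d.get? "CST"), ("csosn", d.get? "CSOSN")]
      ++ asc.map (fun i => (pvTargets.getD i "", d.get? (pvSources.getD i ""))) := by
    simpa using PySem.Dict.items_foldl_insert_fresh _ Prod.fst Prod.snd
      PySem.Dict.empty (fun a _ => PySem.Dict.contains_empty _) hparnd
  rw [hofl]
  -- both sides are now base ++ the same map over the same index list
  have htab : pvTable = (List.range 25).map (fun i => (pvSources.getD i "", pvTargets.getD i "")) := by
    decide
  rw [htab, List.filter_map, List.map_map]
  rfl

-- ===== VERDICT (by name: the statement is the Claim_ definition above) =====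
theorem extrair_icms_py_spec : Claim_equal_extrair_icms_py := by
  intro dados _ hpre
  unfold Spec_extrair_icms_py extrair_icms_py_alt
  rw [pvA_eq_fold, ← pvFindIcmsA_eq_find?]
  exact pvMain (pvFindIcmsA dados).1 (pvFindIcmsA dados).2 (pvFind_nodup dados hpre.2)
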